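-- pv_equiv track=rewrite | github.com/malikadan212/AutoVulRepair | ai_patch_generator.py | _parse_patch_response
-- ===== SOURCE A (Python) =====
-- from typing import Dict, Any, List
--
-- def _parse_patch_response(response_text: str, vulnerability: Dict[str, Any]) -> Dict[str, Any]:
--     """Parse Gemini response into structured patch data"""
--
--     # Extract sections
--     sections = {
--         'patched_code': '',
--         'explanation': '',
--         'testing_recommendations': '',
--         'additional_recommendations': ''
--     }
--
--     # Simple parsing (you can make this more robust)
--     current_section = None
--     lines = response_text.split('\n')
--
--     for line in lines:
--         if '## Patched Code' in line or '##Patched Code' in line: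
--             current_section = 'patched_code'
--         elif '## Explanation' in line or '##Explanation' in line:
--             current_section = 'explanation'
--         elif '## Testing' in line or '##Testing' in line:
--             current_section = 'testing_recommendations'
--         elif '## Additional' in line or '##Additional' in line:
--             current_section = 'additional_recommendations'
--         elif current_section:
--             sections[current_section] += line + '\n'
--
--     # Clean up code blocks
--     patched_code = sections['patched_code']
--     if '```' in patched_code:
--         # Extract code from markdown code blocks
--         parts = patched_code.split('```')
--         if len(parts) >= 2:
--             code = parts[1]
--             # Remove language identifier
--             if '\n' in code:
--                 code = '\n'.join(code.split('\n')[1:])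
--             patched_code = code.strip()
--
--     return {
--         'patched_code': patched_code.strip(),
--         'explanation': sections['explanation'].strip(),
--         'testing_recommendations': sections['testing_recommendations'].strip(),
--         'additional_recommendations': sections['additional_recommendations'].strip(),
--         'original_code': vulnerability.get('code_snippet', ''),
--         'file': vulnerability.get('file', ''),
--         'line': vulnerability.get('line', ''),
--         'status': 'generated'
--     }
-- ===== SOURCE B (Python) =====
-- from typing import Dict, Any, List
--
-- _HEADER_TESTS = [
--     (('## Patched Code', '##Patched Code'), 'patched_code'),
--     (('## Explanation', '##Explanation'), 'explanation'),
--     (('## Testing', '##Testing'), 'testing_recommendations'),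
--     (('## Additional', '##Additional'), 'additional_recommendations'),
-- ]
--
--
-- def _classify(line: str):
--     """Section key if the line is a header line, else None (same elif priority as the markdown spec)."""
--     for subs, key in _HEADER_TESTS:
--         if subs[0] in line or subs[1] in line:
--             return key
--     return None
--
--
-- def _split_block(lines: List[str]):
--     """Split at the first header line: (body before it, remainder starting at it)."""
--     for idx, l in enumerate(lines):
--         if _classify(l) is not None:
--             return lines[:idx], lines[idx:]
--     return lines, []
--
--
-- def _parse_patch_response(response_text: str, vulnerability: Dict[str, Any]) -> Dict[str, Any]:
--     """Parse Gemini response into structured patch data (boundary-then-group decomposition)."""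
--     buckets = {
--         'patched_code': '',
--         'explanation': '',
--         'testing_recommendations': '',
--         'additional_recommendations': ''
--     }
--
--     lines = response_text.split('\n')
--     _, rest = _split_block(lines)          # lines before the first header are unassigned
--     while rest:
--         key = _classify(rest[0])
--         body, rest = _split_block(rest[1:])
--         if key is not None:                # always true here: rest starts at a header
--             buckets[key] += ''.join(l + '\n' for l in body)
--
--     # Clean up code blocks
--     patched_code = buckets['patched_code']
--     if '```' in patched_code:
--         parts = patched_code.split('```')
--         if len(parts) >= 2:
--             code = parts[1]
--             if '\n' in code:
--                 code = '\n'.join(code.split('\n')[1:])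
--             patched_code = code.strip()
--
--     return {
--         'patched_code': patched_code.strip(),
--         'explanation': buckets['explanation'].strip(),
--         'testing_recommendations': buckets['testing_recommendations'].strip(),
--         'additional_recommendations': buckets['additional_recommendations'].strip(),
--         'original_code': vulnerability.get('code_snippet', ''),
--         'file': vulnerability.get('file', ''),
--         'line': vulnerability.get('line', ''),
--         'status': 'generated'
--     }
-- ===== Notes on version B (the rewrite author's own statement) =====
-- stated objective: alternative
-- what changed: Replaces A's line-by-line loop carrying a running current_section flag by a boundary-then-group decomposition: a helper splits the line list at header lines, and each block between consecutive headers is appended wholesale to its section's bucket; code-block stripping and the result dict are unchanged.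
import Mathlib
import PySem

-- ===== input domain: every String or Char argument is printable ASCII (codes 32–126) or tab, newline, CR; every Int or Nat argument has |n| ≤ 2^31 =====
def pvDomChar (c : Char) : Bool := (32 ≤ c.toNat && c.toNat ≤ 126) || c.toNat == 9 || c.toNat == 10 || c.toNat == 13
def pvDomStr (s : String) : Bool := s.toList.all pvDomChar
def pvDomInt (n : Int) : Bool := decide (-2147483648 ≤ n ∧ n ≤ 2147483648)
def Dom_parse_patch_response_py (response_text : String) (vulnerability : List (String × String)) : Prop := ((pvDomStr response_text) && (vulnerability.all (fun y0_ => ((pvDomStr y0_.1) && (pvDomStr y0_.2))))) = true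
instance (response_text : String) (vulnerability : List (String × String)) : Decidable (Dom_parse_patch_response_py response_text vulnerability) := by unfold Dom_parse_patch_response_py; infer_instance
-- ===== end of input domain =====

-- B replaces A's running current_section flag by a boundary-then-group decomposition
-- (split the line list at header lines, append each inter-header block wholesale);
-- code-block stripping and the result dict are unchanged. Objective: alternative.

-- ===== PORT A =====
-- A: line-by-line loop over response_text.split('\n') carrying (current_section, sections).
def parse_patch_response_py (response_text : String) (vulnerability : List (String × String)) : List (String × String) :=
  let sections : PySem.Dict String String :=
    PySem.Dict.mk [("patched_code", ""), ("explanation", ""),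
                   ("testing_recommendations", ""), ("additional_recommendations", "")]
  -- response_text.split('\n'); sep is the non-empty literal '\n', so split? never returns none
  let lines : List String := (PySem.Str.split? response_text "\n").getD []
  let st : Option String × PySem.Dict String String :=
    lines.foldl (fun st line =>
      if PySem.Str.isIn "## Patched Code" line || PySem.Str.isIn "##Patched Code" line then
        (some "patched_code", st.2)
      else if PySem.Str.isIn "## Explanation" line || PySem.Str.isIn "##Explanation" line then
        (some "explanation", st.2)
      else if PySem.Str.isIn "## Testing" line || PySem.Str.isIn "##Testing" line then
        (some "testing_recommendations", st.2)
      else if PySem.Str.isIn "## Additional" line || PySem.Str.isIn "##Additional" line then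
        (some "additional_recommendations", st.2)
      else
        -- 'elif current_section:' — sections[current_section] += line + '\n'
        match st.1 with
        | some k => (some k, st.2.modify k "" (fun s => s ++ line ++ "\n"))
        | none => st) (none, sections)
  let sections := st.2
  let patched_code := sections.getD "patched_code" ""
  let patched_code :=
    if PySem.Str.isIn "```" patched_code then
      let parts := (PySem.Str.split? patched_code "```").getD []
      if 2 ≤ parts.length then
        let code := parts.getD 1 ""      -- parts[1], in range by the length guard
        let code :=
          if PySem.Str.isIn "\n" code then
            PySem.Str.join "\n" (((PySem.Str.split? code "\n").getD []).drop 1)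
          else code
        PySem.Str.strip code
      else patched_code
    else patched_code
  [("patched_code", PySem.Str.strip patched_code),
   ("explanation", PySem.Str.strip (sections.getD "explanation" "")),
   ("testing_recommendations", PySem.Str.strip (sections.getD "testing_recommendations" "")),
   ("additional_recommendations", PySem.Str.strip (sections.getD "additional_recommendations" "")),
   ("original_code", (PySem.Dict.mk vulnerability).getD "code_snippet" ""),
   ("file", (PySem.Dict.mk vulnerability).getD "file" ""),
   ("line", (PySem.Dict.mk vulnerability).getD "line" ""),
   ("status", "generated")]

-- ===== PORT B =====
-- _classify: section key if the line is a header line, else none (same elif priority).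
def pvClassify (line : String) : Option String :=
  if PySem.Str.isIn "## Patched Code" line || PySem.Str.isIn "##Patched Code" line then
    some "patched_code"
  else if PySem.Str.isIn "## Explanation" line || PySem.Str.isIn "##Explanation" line then
    some "explanation"
  else if PySem.Str.isIn "## Testing" line || PySem.Str.isIn "##Testing" line then
    some "testing_recommendations"
  else if PySem.Str.isIn "## Additional" line || PySem.Str.isIn "##Additional" line then
    some "additional_recommendations"
  else none

-- _split_block: split at the first header line: (body before it, remainder starting at it).
def pvSplitBlock : List String → List String × List String
  | [] => ([], [])
  | l :: rest =>
    if (pvClassify l).isSome then ([], l :: rest)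
    else
      let p := pvSplitBlock rest
      (l :: p.1, p.2)

-- needed by collectB's termination; cited there by name
theorem pvSplitBlock_len (ls : List String) : (pvSplitBlock ls).2.length ≤ ls.length := by
  induction ls with
  | nil => simp [pvSplitBlock]
  | cons l rest ih =>
    simp only [pvSplitBlock]
    split
    · simp
    · simpa using Nat.le_succ_of_le ih

-- ''.join(l + '\n' for l in body)
def pvBodyStr (body : List String) : String :=
  PySem.Str.join "" (body.map (fun l => l ++ "\n"))

-- the while loop: rest starts at a header (or is empty); consume header, append its block
def pvCollect : List String → PySem.Dict String String → PySem.Dict String String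
  | [], buckets => buckets
  | l :: rest, buckets =>
    let p := pvSplitBlock rest
    let buckets' :=
      match pvClassify l with
      | some key => buckets.modify key "" (fun s => s ++ pvBodyStr p.1)
      | none => buckets        -- never reached: rest always starts at a header line
    pvCollect p.2 buckets'
termination_by ls _ => ls.length
decreasing_by
  have := pvSplitBlock_len rest
  simp only [List.length_cons]
  omega

def parse_patch_response_py_alt (response_text : String) (vulnerability : List (String × String)) : List (String × String) :=
  let buckets : PySem.Dict String String :=
    PySem.Dict.mk [("patched_code", ""), ("explanation", ""),
                   ("testing_recommendations", ""), ("additional_recommendations", "")]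
  let lines : List String := (PySem.Str.split? response_text "\n").getD []
  -- lines before the first header are unassigned
  let rest := (pvSplitBlock lines).2
  let buckets := pvCollect rest buckets
  let patched_code := buckets.getD "patched_code" ""
  let patched_code :=
    if PySem.Str.isIn "```" patched_code then
      let parts := (PySem.Str.split? patched_code "```").getD []
      if 2 ≤ parts.length then
        let code := parts.getD 1 ""
        let code :=
          if PySem.Str.isIn "\n" code then
            PySem.Str.join "\n" (((PySem.Str.split? code "\n").getD []).drop 1)
          else code
        PySem.Str.strip code
      else patched_code
    else patched_code
  [("patched_code", PySem.Str.strip patched_code),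
   ("explanation", PySem.Str.strip (buckets.getD "explanation" "")),
   ("testing_recommendations", PySem.Str.strip (buckets.getD "testing_recommendations" "")),
   ("additional_recommendations", PySem.Str.strip (buckets.getD "additional_recommendations" "")),
   ("original_code", (PySem.Dict.mk vulnerability).getD "code_snippet" ""),
   ("file", (PySem.Dict.mk vulnerability).getD "file" ""),
   ("line", (PySem.Dict.mk vulnerability).getD "line" ""),
   ("status", "generated")]

-- ===== PRECONDITION & SPEC =====
def Spec_parse_patch_response_py (response_text : String) (vulnerability : List (String × String)) (out : List (String × String)) : Prop := out = parse_patch_response_py_alt response_text vulnerability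
instance (response_text : String) (vulnerability : List (String × String)) (out : List (String × String)) : Decidable (Spec_parse_patch_response_py response_text vulnerability out) := by unfold Spec_parse_patch_response_py; infer_instance

-- ===== CLAIM (what is proved, stated in full; the proofs are below) =====
def Claim_equal_parse_patch_response_py : Prop := ∀ (response_text : String) (vulnerability : List (String × String)), Dom_parse_patch_response_py response_text vulnerability → Spec_parse_patch_response_py response_text vulnerability (parse_patch_response_py response_text vulnerability)

-- ===== LEMMAS AND PROOFS =====

-- A's loop body, phrased through pvClassify (proof-side view of the literal lambda)
def pvStepA (st : Option String × PySem.Dict String String) (line : String) :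
    Option String × PySem.Dict String String :=
  match pvClassify line with
  | some k => (some k, st.2)
  | none =>
    match st.1 with
    | some k => (some k, st.2.modify k "" (fun s => s ++ line ++ "\n"))
    | none => st

theorem pvStepA_eq :
    (fun (st : Option String × PySem.Dict String String) (line : String) =>
      if PySem.Str.isIn "## Patched Code" line || PySem.Str.isIn "##Patched Code" line then
        (some "patched_code", st.2)
      else if PySem.Str.isIn "## Explanation" line || PySem.Str.isIn "##Explanation" line then
        (some "explanation", st.2)
      else if PySem.Str.isIn "## Testing" line || PySem.Str.isIn "##Testing" line then
        (some "testing_recommendations", st.2)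
      else if PySem.Str.isIn "## Additional" line || PySem.Str.isIn "##Additional" line then
        (some "additional_recommendations", st.2)
      else
        match st.1 with
        | some k => (some k, st.2.modify k "" (fun s => s ++ line ++ "\n"))
        | none => st) = pvStepA := by
  funext st line
  simp only [pvStepA, pvClassify]
  split_ifs <;> simp [String.append_assoc]

theorem pvBodyStr_nil : pvBodyStr [] = "" := rfl

theorem pvBodyStr_cons (l : String) (b : List String) :
    pvBodyStr (l :: b) = (l ++ "\n") ++ pvBodyStr b := by
  apply String.toList_inj.mp
  simp only [pvBodyStr, PySem.Str.toList_join, PySem.Chars.join, List.map_cons,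
    String.toList_append]
  cases b <;> simp [List.intercalate]

theorem pvSplitBlock_cons_some {l : String} (h : (pvClassify l).isSome) (rest : List String) :
    pvSplitBlock (l :: rest) = ([], l :: rest) := by
  simp [pvSplitBlock, h]

theorem pvSplitBlock_cons_none {l : String} (h : pvClassify l = none) (rest : List String) :
    pvSplitBlock (l :: rest) = (l :: (pvSplitBlock rest).1, (pvSplitBlock rest).2) := by
  simp [pvSplitBlock, h]

-- pointwise-equal buckets stay pointwise equal through pvCollect
theorem pvCollect_congr (ls : List String) (d : PySem.Dict String String) :
    ∀ (d' : PySem.Dict String String), (∀ c, d.getD c "" = d'.getD c "") →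
      ∀ c, (pvCollect ls d).getD c "" = (pvCollect ls d').getD c "" := by
  induction ls, d using pvCollect.induct with
  | case1 buckets => intro d' h c; simpa [pvCollect] using h c
  | case2 l rest buckets p buckets_ ih =>
    intro d' h c
    rw [pvCollect, pvCollect]
    apply ih
    intro c'
    simp only [buckets_, p]
    cases hcl : pvClassify l with
    | none => simpa using h c'
    | some k =>
      simp only [PySem.Dict.modify, PySem.Dict.getD_insert]
      split
      · rw [h k]
      · exact h c'

-- a modify that appends "" is invisible to getD
theorem pvGetD_modify_empty (d : PySem.Dict String String) (k c : String) :
    (d.modify k "" (fun s => s ++ "")).getD c "" = d.getD c "" := by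
  simp only [PySem.Dict.modify, PySem.Dict.getD_insert, String.append_empty]
  split
  · subst_vars; rfl
  · rfl

-- two appends at the same key fuse
theorem pvGetD_modify_modify (d : PySem.Dict String String) (k c : String) (a b : String) :
    ((d.modify k "" (fun s => s ++ a)).modify k "" (fun s => s ++ b)).getD c "" =
      (d.modify k "" (fun s => s ++ (a ++ b))).getD c "" := by
  simp only [PySem.Dict.modify, PySem.Dict.getD_insert]
  split_ifs <;> simp [String.append_assoc]

-- main invariant, current_section = some k:
-- A keeps appending lines one at a time; B appends the whole block at the header.
theorem pvLoop_some (ls : List String) :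
    ∀ (k : String) (d : PySem.Dict String String) (c : String),
      ((ls.foldl pvStepA (some k, d)).2).getD c "" =
        (pvCollect (pvSplitBlock ls).2
          (d.modify k "" (fun s => s ++ pvBodyStr (pvSplitBlock ls).1))).getD c "" := by
  induction ls with
  | nil =>
    intro k d c
    simp only [List.foldl_nil, pvSplitBlock, pvCollect, pvBodyStr_nil]
    exact (pvGetD_modify_empty d k c).symm
  | cons l rest ih =>
    intro k d c
    cases hcl : pvClassify l with
    | some k' =>
      have hstep : pvStepA (some k, d) l = (some k', d) := by simp [pvStepA, hcl]
      rw [List.foldl_cons, hstep,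
        pvSplitBlock_cons_some (by simp [hcl]), ih k' d c]
      -- RHS: unfold one step of pvCollect on the header l
      conv_rhs => rw [pvCollect]
      simp only [hcl]
      apply pvCollect_congr
      intro c'
      simp only [PySem.Dict.modify, PySem.Dict.getD_insert, pvBodyStr_nil,
        String.append_empty]
      split_ifs <;> simp_all
    | none =>
      have hstep : pvStepA (some k, d) l =
          (some k, d.modify k "" (fun s => s ++ l ++ "\n")) := by simp [pvStepA, hcl]
      rw [List.foldl_cons, hstep, pvSplitBlock_cons_none hcl,
        ih k (d.modify k "" (fun s => s ++ l ++ "\n")) c]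
      apply pvCollect_congr
      intro c'
      have : (fun s => s ++ l ++ "\n") = (fun s => s ++ (l ++ "\n")) := by
        funext s; rw [String.append_assoc]
      rw [this, pvGetD_modify_modify, pvBodyStr_cons]

-- current_section = None: lines before the first header are discarded by both
theorem pvLoop_none (ls : List String) :
    ∀ (d : PySem.Dict String String) (c : String),
      ((ls.foldl pvStepA (none, d)).2).getD c "" =
        (pvCollect (pvSplitBlock ls).2 d).getD c "" := by
  induction ls with
  | nil => intro d c; simp [pvSplitBlock, pvCollect]
  | cons l rest ih =>
    intro d c
    cases hcl : pvClassify l with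
    | some k' =>
      have hstep : pvStepA (none, d) l = (some k', d) := by simp [pvStepA, hcl]
      rw [List.foldl_cons, hstep, pvSplitBlock_cons_some (by simp [hcl])]
      conv_rhs => rw [pvCollect]
      simp only [hcl]
      rw [pvLoop_some rest k' d c]
    | none =>
      have hstep : pvStepA (none, d) l = (none, d) := by simp [pvStepA, hcl]
      rw [List.foldl_cons, hstep, pvSplitBlock_cons_none hcl, ih d c]

-- ===== VERDICT (by name: the statement is the Claim_ definition above) =====
theorem parse_patch_response_py_spec : Claim_equal_parse_patch_response_py := by
  intro response_text vulnerability _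
  unfold Spec_parse_patch_response_py parse_patch_response_py parse_patch_response_py_alt
  rw [pvStepA_eq]
  have G := pvLoop_none ((PySem.Str.split? response_text "\n").getD [])
    (PySem.Dict.mk [("patched_code", ""), ("explanation", ""),
      ("testing_recommendations", ""), ("additional_recommendations", "")])
  simp only [G]
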